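-- pv_equiv track=rewrite | github.com/MrBrantCode/unitest_baseline | mut_generate/mist_train_cf/cf_2061/solution.py | reverse_multiline
-- ===== SOURCE A (Python) =====
-- def reverse_multiline(message):
--     lines = message.split('\n')
--     reversed_lines = []
--
--     for line in lines:
--         line = line.strip()
--         if line:
--             reversed_line = line[::-1]
--             reversed_lines.append(reversed_line)
--
--     reversed_message = '\n'.join(reversed_lines[::-1])
--     return reversed_message
-- ===== SOURCE B (Python) =====
-- def reverse_multiline(message):
--     kept = [s for s in (line.strip() for line in message.split('\n')) if s]
--     return '\n'.join(kept)[::-1]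
-- ===== Notes on version B (the rewrite author's own statement) =====
-- stated objective: simpler
-- what changed: B keeps the strip-and-drop-empty pass but replaces A's per-line reversal plus list reversal with a single whole-string reversal of the joined result, using the identity reverse(join(ls)) = join(reversed segments in reversed order).
import Mathlib
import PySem

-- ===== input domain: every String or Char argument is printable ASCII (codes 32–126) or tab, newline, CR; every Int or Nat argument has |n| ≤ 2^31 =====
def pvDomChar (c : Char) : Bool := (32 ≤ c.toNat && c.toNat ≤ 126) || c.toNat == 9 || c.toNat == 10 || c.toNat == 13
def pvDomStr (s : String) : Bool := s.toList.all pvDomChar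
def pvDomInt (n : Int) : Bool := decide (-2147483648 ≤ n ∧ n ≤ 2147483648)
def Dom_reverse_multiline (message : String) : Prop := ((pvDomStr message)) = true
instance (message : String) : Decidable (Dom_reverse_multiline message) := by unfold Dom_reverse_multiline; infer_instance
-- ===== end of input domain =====

-- B keeps the strip-and-drop-empty pass but replaces the per-line reversal plus list
-- reversal by a single whole-string reversal of the joined result (objective: simpler).

-- ===== PORT A =====
def reverse_multiline (message : String) : String :=
  -- lines = message.split('\n')
  let lines := PySem.Chars.splitOn message.toList ['\n']
  -- loop: strip, keep non-empty, append line[::-1]  (s[::-1] = reverse, PySem.Chars slice?_none_none_neg_one)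
  let reversedLines := lines.foldl (fun acc line =>
    let line := PySem.Chars.strip line
    if line ≠ [] then acc ++ [line.reverse] else acc) []
  -- '\n'.join(reversed_lines[::-1])
  String.ofList (PySem.Chars.join ['\n'] reversedLines.reverse)

-- ===== PORT B =====
def reverse_multiline_alt (message : String) : String :=
  let kept := ((PySem.Chars.splitOn message.toList ['\n']).map PySem.Chars.strip).filter
    (fun s => s ≠ [])
  -- '\n'.join(kept)[::-1]
  String.ofList (PySem.Chars.join ['\n'] kept).reverse

-- ===== PRECONDITION & SPEC =====
def Spec_reverse_multiline (message : String) (out : String) : Prop := out = reverse_multiline_alt message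
instance (message : String) (out : String) : Decidable (Spec_reverse_multiline message out) := by unfold Spec_reverse_multiline; infer_instance

-- ===== CLAIM (what is proved, stated in full; the proofs are below) =====
def Claim_equal_reverse_multiline : Prop := ∀ (message : String), Dom_reverse_multiline message → Spec_reverse_multiline message (reverse_multiline message)

-- ===== LEMMAS AND PROOFS =====

-- join of xs ++ [y]: y alone if xs is empty, otherwise append sep and y
theorem join_append_singleton (sep : List Char) (xs : List (List Char)) (y : List Char) :
    PySem.Chars.join sep (xs ++ [y]) =
      if xs = [] then y else PySem.Chars.join sep xs ++ sep ++ y := by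
  induction xs with
  | nil => simp [PySem.Chars.join_singleton]
  | cons x xs ih =>
    rcases xs with _ | ⟨z, zs⟩
    · simp [PySem.Chars.join_cons_cons, PySem.Chars.join_singleton]
    · simp only [List.cons_append, PySem.Chars.join_cons_cons] at *
      rw [ih]
      simp [List.append_assoc]

-- reversing each newline-separated segment and the segment order = reversing the joined string
theorem join_reverse_eq (ls : List (List Char)) :
    PySem.Chars.join ['\n'] ((ls.map List.reverse).reverse) =
      (PySem.Chars.join ['\n'] ls).reverse := by
  induction ls with
  | nil => simp [PySem.Chars.join_nil]
  | cons a ls ih =>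
    simp only [List.map_cons, List.reverse_cons]
    rw [join_append_singleton]
    rcases ls with _ | ⟨b, bs⟩
    · simp [PySem.Chars.join_singleton]
    · have hne : (((b :: bs).map List.reverse).reverse) ≠ [] := by simp
      rw [if_neg hne, ih, PySem.Chars.join_cons_cons]
      simp

-- A's loop is an append-if fold: it produces map-over-filter
theorem loop_eq (lines : List (List Char)) :
    lines.foldl (fun acc line =>
      let line := PySem.Chars.strip line
      if line ≠ [] then acc ++ [line.reverse] else acc) [] =
      (lines.filter (fun l => decide (PySem.Chars.strip l ≠ []))).map
        (fun l => (PySem.Chars.strip l).reverse) := by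
  have h := PySem.List.foldl_append_if (fun l => decide (PySem.Chars.strip l ≠ []))
    (fun l => (PySem.Chars.strip l).reverse) lines []
  simp only [List.nil_append] at h
  rw [← h]
  apply PySem.List.foldl_congr_mem
  intro acc l _
  by_cases hs : PySem.Chars.strip l = [] <;> simp [hs]

-- ===== VERDICT (by name: the statement is the Claim_ definition above) =====
theorem reverse_multiline_spec : Claim_equal_reverse_multiline := by
  intro message _
  unfold Spec_reverse_multiline reverse_multiline reverse_multiline_alt
  simp only [loop_eq, List.filter_map, ← join_reverse_eq, Function.comp_def, List.map_map]
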